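-- pv_equiv track=rewrite | github.com/Abhijit1018/Code-Legacy-frontend | legacy_modernizer/analysis/ast_parser.py | _count_positions
-- ===== SOURCE A (Python) =====
-- def _count_positions(pic_fragment: str) -> int:
--     """Count the number of character positions in a PIC fragment like '9(5)' or 'XXX'."""
--     total = 0
--     i = 0
--     while i < len(pic_fragment):
--         ch = pic_fragment[i]
--         if ch in "9XAZ*$":
--             # Check for repeat notation: 9(5)
--             if i + 1 < len(pic_fragment) and pic_fragment[i + 1] == "(":
--                 close = pic_fragment.find(")", i + 2)
--                 if close != -1:
--                     try:
--                         total += int(pic_fragment[i + 2 : close])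
--                     except ValueError:
--                         total += 1
--                     i = close + 1
--                     continue
--             total += 1
--         i += 1
--     return total
-- ===== SOURCE B (Python) =====
-- def _count_positions(pic_fragment: str) -> int:
--     """Tokenize the fragment into PIC items (repeat body or bare char), then sum weights."""
--     tokens = []
--     s = pic_fragment
--     while s:
--         ch, s = s[0], s[1:]
--         if ch in "9XAZ*$":
--             if s.startswith("(") and ")" in s:
--                 inner, _, s = s[1:].partition(")")
--                 tokens.append(inner)
--             else:
--                 tokens.append(None)
--
--     def weight(tok):
--         if tok is None:
--             return 1
--         try:
--             return int(tok)
--         except ValueError: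
--             return 1
--
--     return sum(map(weight, tokens))
-- ===== Notes on version B (the rewrite author's own statement) =====
-- stated objective: idiomatic
-- what changed: Replaces A's single index-based while loop (with find/index bookkeeping and an interleaved running total) by a two-phase decomposition: first tokenize the fragment into repeat-group/bare-character tokens by consuming the remaining suffix with startswith/partition, then sum each token's weight with sum(map(weight, tokens)).
import Mathlib
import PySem

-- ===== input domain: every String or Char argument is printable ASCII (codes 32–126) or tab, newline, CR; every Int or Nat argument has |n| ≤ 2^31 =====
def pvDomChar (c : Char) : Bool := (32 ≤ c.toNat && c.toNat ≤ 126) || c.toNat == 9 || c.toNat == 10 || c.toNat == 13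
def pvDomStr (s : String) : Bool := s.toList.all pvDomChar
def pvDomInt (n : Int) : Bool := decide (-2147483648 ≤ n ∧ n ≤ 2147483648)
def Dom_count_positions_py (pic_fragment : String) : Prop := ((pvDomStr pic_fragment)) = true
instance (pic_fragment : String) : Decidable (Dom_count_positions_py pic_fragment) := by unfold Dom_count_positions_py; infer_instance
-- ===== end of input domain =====

-- B replaces A's index-based while loop (with str.find bookkeeping) by a two-phase
-- tokenize-then-sum decomposition over the remaining suffix (objective: idiomatic).

-- ===== PORT A =====
-- the PIC position characters "9XAZ*$"
def pvPicChars : List Char := ['9', 'X', 'A', 'Z', '*', '$']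

-- A's while loop: index i, running total; fuel bounds the iteration count (fuel = length suffices)
def pvALoop (cs : List Char) (fuel : Nat) (i : Nat) (total : Int) : Int :=
  match fuel with
  | 0 => total
  | fuel + 1 =>
    if i < cs.length then
      if pvPicChars.contains (cs.getD i ' ') then
        if i + 1 < cs.length ∧ cs.getD (i + 1) ' ' = '(' then
          if PySem.Chars.findFrom cs [')'] ((i : Int) + 2) none ≠ -1 then
            match PySem.Int.ofChars? (PySem.List.slice cs (some ((i : Int) + 2))
                (some (PySem.Chars.findFrom cs [')'] ((i : Int) + 2) none))) with
            | some v =>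
              pvALoop cs fuel ((PySem.Chars.findFrom cs [')'] ((i : Int) + 2) none).toNat + 1) (total + v)
            | none =>
              pvALoop cs fuel ((PySem.Chars.findFrom cs [')'] ((i : Int) + 2) none).toNat + 1) (total + 1)
          else
            pvALoop cs fuel (i + 1) (total + 1)
        else
          pvALoop cs fuel (i + 1) (total + 1)
      else
        pvALoop cs fuel (i + 1) total
    else
      total

def count_positions_py (pic_fragment : String) : Int :=
  pvALoop pic_fragment.toList pic_fragment.toList.length 0 0

-- ===== PORT B =====
-- B phase 1: cut the fragment into tokens — `some inner` for a closed repeat group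
-- (inner = text before the first ')', hand port of s[1:].partition(")") whose first
-- and third components are exact here because ')' is known to occur), `none` for a bare PIC char.
def pvTokenize (s : List Char) : List (Option (List Char)) :=
  match s with
  | [] => []
  | ch :: s' =>
    if pvPicChars.contains ch then
      if PySem.Chars.startswith s' ['('] && PySem.Chars.isIn [')'] s' then
        some (s'.tail.take (PySem.Chars.find s'.tail [')']).toNat) ::
          pvTokenize (s'.tail.drop ((PySem.Chars.find s'.tail [')']).toNat + 1))
      else
        none :: pvTokenize s'
    else
      pvTokenize s'
termination_by s.length
decreasing_by
  all_goals simp only [List.length_cons, List.length_drop, List.length_tail]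
  all_goals omega

-- B phase 2: each token's weight (int(inner), falling back to 1 on ValueError / bare char)
def pvWeight (tok : Option (List Char)) : Int :=
  match tok with
  | none => 1
  | some inner =>
    match PySem.Int.ofChars? inner with
    | some v => v
    | none => 1

def count_positions_py_alt (pic_fragment : String) : Int :=
  ((pvTokenize pic_fragment.toList).map pvWeight).sum

-- ===== PRECONDITION & SPEC =====
def Spec_count_positions_py (pic_fragment : String) (out : Int) : Prop := out = count_positions_py_alt pic_fragment
instance (pic_fragment : String) (out : Int) : Decidable (Spec_count_positions_py pic_fragment out) := by unfold Spec_count_positions_py; infer_instance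

-- ===== CLAIM (what is proved, stated in full; the proofs are below) =====
def Claim_equal_count_positions_py : Prop := ∀ (pic_fragment : String), Dom_count_positions_py pic_fragment → Spec_count_positions_py pic_fragment (count_positions_py pic_fragment)

-- ===== LEMMAS AND PROOFS =====

theorem pv_singleton_infix_iff {α : Type} (a : α) (l : List α) : [a] <:+: l ↔ a ∈ l := by
  constructor
  · rintro ⟨p, s, rfl⟩; simp
  · intro h
    obtain ⟨p, s, rfl⟩ := List.append_of_mem h
    exact ⟨p, s, by simp⟩

theorem pv_main (cs : List Char) : ∀ (fuel i : Nat) (total : Int),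
    cs.length - i ≤ fuel →
    pvALoop cs fuel i total = total + ((pvTokenize (cs.drop i)).map pvWeight).sum := by
  intro fuel
  induction fuel with
  | zero =>
    intro i total h
    have hi : cs.length ≤ i := by omega
    simp [pvALoop, List.drop_eq_nil_of_le hi, pvTokenize]
  | succ fuel ih =>
    intro i total h
    rw [pvALoop]
    by_cases hi : i < cs.length
    · rw [if_pos hi]
      have hdrop : cs.drop i = cs[i] :: cs.drop (i + 1) := List.drop_eq_getElem_cons hi
      have hch : cs.getD i ' ' = cs[i] := by
        simp [List.getD_eq_getElem?_getD, List.getElem?_eq_getElem hi]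
      rw [hch]
      by_cases hpic : pvPicChars.contains cs[i] = true
      · rw [if_pos hpic]
        by_cases hparen : i + 1 < cs.length ∧ cs.getD (i + 1) ' ' = '('
        · obtain ⟨hi1, hopen⟩ := hparen
          rw [if_pos ⟨hi1, hopen⟩]
          have hch1 : cs[i + 1] = '(' := by
            rw [List.getD_eq_getElem?_getD, List.getElem?_eq_getElem hi1] at hopen
            simpa using hopen
          have hdrop1 : cs.drop (i + 1) = '(' :: cs.drop (i + 2) := by
            rw [List.drop_eq_getElem_cons hi1, hch1]
          have htail : (cs.drop (i + 1)).tail = cs.drop (i + 2) := by rw [hdrop1]; rfl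
          have hstarts : PySem.Chars.startswith (cs.drop (i + 1)) ['('] = true := by
            rw [PySem.Chars.startswith_iff, hdrop1]; exact ⟨cs.drop (i + 2), rfl⟩
          have hcast : ((i : Int) + 2) = ((i + 2 : Nat) : Int) := by push_cast; ring
          have hff := PySem.Chars.findFrom_natCast cs [')'] (i + 2) (by omega)
          by_cases hcl : PySem.Chars.find (cs.drop (i + 2)) [')'] = -1
          · -- no closing paren after the '(' : both score 1 and step past the PIC char
            have hclose : PySem.Chars.findFrom cs [')'] ((i : Int) + 2) none = -1 := by
              rw [hcast, hff, if_pos hcl]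
            rw [hclose, if_neg (by simp)]
            have hnotin : PySem.Chars.isIn [')'] (cs.drop (i + 1)) = false := by
              rw [PySem.Chars.isIn_eq_false_iff, hdrop1]
              rw [PySem.Chars.find_eq_neg_one_iff] at hcl
              intro hinf
              rw [pv_singleton_infix_iff, List.mem_cons] at hinf
              rcases hinf with h' | h'
              · exact absurd h' (by decide)
              · exact hcl ((pv_singleton_infix_iff _ _).mpr h')
            rw [hdrop, pvTokenize, if_pos hpic, if_neg (by simp [hnotin])]
            rw [List.map_cons, List.sum_cons, ih (i + 1) (total + 1) (by omega)]
            simp [pvWeight, add_assoc]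
          · -- closing paren found at relative index jn in cs.drop (i+2)
            have hnn : 0 ≤ PySem.Chars.find (cs.drop (i + 2)) [')'] := by
              have := PySem.Chars.neg_one_le_find (cs.drop (i + 2)) [')']
              omega
            have hjv : PySem.Chars.find (cs.drop (i + 2)) [')'] =
                (((PySem.Chars.find (cs.drop (i + 2)) [')']).toNat : Nat) : Int) := by omega
            have hclose : PySem.Chars.findFrom cs [')'] ((i : Int) + 2) none =
                ((i + 2 + (PySem.Chars.find (cs.drop (i + 2)) [')']).toNat : Nat) : Int) := by
              rw [hcast, hff, if_neg hcl]; omega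
            have hisin : PySem.Chars.isIn [')'] (cs.drop (i + 1)) = true := by
              have hmem : ')' ∈ cs.drop (i + 2) :=
                (pv_singleton_infix_iff _ _).mp ((PySem.Chars.find_ne_neg_one_iff _ _).mp hcl)
              rw [PySem.Chars.isIn_iff_infix, hdrop1, pv_singleton_infix_iff]
              exact List.mem_cons_of_mem _ hmem
            rw [hclose, if_pos (by omega), Int.toNat_natCast]
            have hslice : PySem.List.slice cs (some ((i : Int) + 2))
                (some ((i + 2 + (PySem.Chars.find (cs.drop (i + 2)) [')']).toNat : Nat) : Int)) =
                (cs.drop (i + 2)).take (PySem.Chars.find (cs.drop (i + 2)) [')']).toNat := by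
              rw [hcast, PySem.List.slice_natCast]
              congr 1
              omega
            rw [hslice]
            rw [hdrop, pvTokenize, if_pos hpic, if_pos (by simp [hstarts, hisin]), htail]
            have hdropnext : (cs.drop (i + 2)).drop ((PySem.Chars.find (cs.drop (i + 2)) [')']).toNat + 1) =
                cs.drop (i + 2 + (PySem.Chars.find (cs.drop (i + 2)) [')']).toNat + 1) := by
              rw [List.drop_drop]
              congr 1
            rw [hdropnext]
            cases hof : PySem.Int.ofChars? ((cs.drop (i + 2)).take (PySem.Chars.find (cs.drop (i + 2)) [')']).toNat) with
            | some v =>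
              dsimp only
              rw [ih _ (total + v) (by omega), List.map_cons, List.sum_cons]
              simp [pvWeight, hof]
              ring
            | none =>
              dsimp only
              rw [ih _ (total + 1) (by omega), List.map_cons, List.sum_cons]
              simp [pvWeight, hof]
              ring
        · rw [if_neg hparen]
          have hstarts : PySem.Chars.startswith (cs.drop (i + 1)) ['('] = false := by
            by_cases hi1 : i + 1 < cs.length
            · have hne : cs.getD (i + 1) ' ' ≠ '(' := fun hc => hparen ⟨hi1, hc⟩
              rw [List.getD_eq_getElem?_getD, List.getElem?_eq_getElem hi1] at hne
              simp only [Option.getD_some] at hne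
              rw [List.drop_eq_getElem_cons hi1, Bool.eq_false_iff]
              intro hs
              rw [PySem.Chars.startswith_iff] at hs
              obtain ⟨u, hu⟩ := hs
              simp only [List.cons_append, List.cons.injEq] at hu
              exact hne hu.1.symm
            · rw [List.drop_eq_nil_of_le (by omega)]; rfl
          rw [hdrop, pvTokenize, if_pos hpic, if_neg (by simp [hstarts])]
          rw [List.map_cons, List.sum_cons, ih (i + 1) (total + 1) (by omega)]
          simp [pvWeight, add_assoc]
      · rw [if_neg hpic, hdrop, pvTokenize, if_neg hpic]
        exact ih (i + 1) total (by omega)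
    · rw [if_neg hi]
      rw [List.drop_eq_nil_of_le (by omega), pvTokenize]
      simp

-- ===== VERDICT (by name: the statement is the Claim_ definition above) =====
theorem count_positions_py_spec : Claim_equal_count_positions_py := by
  intro s _
  unfold Spec_count_positions_py count_positions_py count_positions_py_alt
  rw [pv_main s.toList s.toList.length 0 0 (by omega)]
  simp
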